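-- pv_equiv track=rewrite | github.com/Met2348/abr | src/ours/phase_a/answer_extraction.py | _truncate_chat_leakage
-- ===== SOURCE A (Python) =====
-- def _truncate_chat_leakage(text: str) -> str:
--     """Cut text at common prompt-leak markers.
--
--     Why this exists
--     ---------------
--     Some generations continue into synthetic next-turn text, e.g.:
--     ``noHuman: Is the following statement ...``.
--     For StrategyQA we only need the first binary decision token.
--     """
--     lowered = text.lower()
--     markers = [
--         "[system]",
--         "[user]",
--         "[assistant]",
--         "human:",
--         "user:",
--         "assistant:",
--     ]
--     cut_positions = [lowered.find(marker) for marker in markers]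
--     cut_positions = [pos for pos in cut_positions if pos >= 0]
--     if not cut_positions:
--         return text.strip()
--     cut = min(cut_positions)
--     return text[:cut].strip()
-- ===== SOURCE B (Python) =====
-- def _truncate_chat_leakage(text: str) -> str:
--     """Cut text at the earliest prompt-leak marker (single left-to-right scan)."""
--     lowered = text.lower()
--     markers = [
--         "[system]",
--         "[user]",
--         "[assistant]",
--         "human:",
--         "user:",
--         "assistant:",
--     ]
--     for i in range(len(lowered)):
--         if any(lowered.startswith(m, i) for m in markers):
--             return text[:i].strip()
--     return text.strip()
-- ===== Notes on version B (the rewrite author's own statement) =====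
-- stated objective: alternative
-- what changed: Replaces six independent full str.find scans plus an explicit min over the collected positions with one left-to-right pass that stops at the first position where any marker starts.
import Mathlib
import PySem

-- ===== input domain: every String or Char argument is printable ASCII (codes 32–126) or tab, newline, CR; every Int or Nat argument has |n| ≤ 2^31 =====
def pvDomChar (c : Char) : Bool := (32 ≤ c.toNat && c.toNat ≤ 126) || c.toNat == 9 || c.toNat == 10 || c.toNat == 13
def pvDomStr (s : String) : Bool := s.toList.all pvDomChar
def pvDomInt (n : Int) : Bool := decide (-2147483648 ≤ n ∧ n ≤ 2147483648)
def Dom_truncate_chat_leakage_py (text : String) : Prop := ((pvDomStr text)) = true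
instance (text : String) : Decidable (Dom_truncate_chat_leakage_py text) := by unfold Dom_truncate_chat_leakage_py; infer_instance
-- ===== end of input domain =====

-- B replaces six independent full find scans plus min with a single left-to-right
-- scan that stops at the first position where any marker starts (alternative decomposition).


-- the shared marker list
def pvMarkers : List (List Char) :=
  ["[system]".toList, "[user]".toList, "[assistant]".toList,
   "human:".toList, "user:".toList, "assistant:".toList]

-- ===== PORT A =====
def truncate_chat_leakage_py (text : String) : String :=
  let lowered := PySem.Chars.lower text.toList
  let cut_positions := pvMarkers.map (fun marker => PySem.Chars.find lowered marker)
  let cut_positions2 := cut_positions.filter (fun pos => decide (0 ≤ pos))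
  match PySem.List.min? cut_positions2 (fun x => x) with
  | none => PySem.Str.strip text
  | some cut => PySem.Str.strip (PySem.Str.slice text none (some cut))

-- ===== PORT B =====
-- the for-loop of Source B: first index i with some marker starting at i in the suffix
def pvScan (markers : List (List Char)) : List Char → Nat → Option Nat
  | [], _ => none
  | c :: rest, i =>
    if markers.any (fun m => m.isPrefixOf (c :: rest)) then some i
    else pvScan markers rest (i + 1)

def truncate_chat_leakage_py_alt (text : String) : String :=
  let lowered := PySem.Chars.lower text.toList
  match pvScan pvMarkers lowered 0 with
  | some i => PySem.Str.strip (PySem.Str.slice text none (some (i : Int)))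
  | none => PySem.Str.strip text

-- ===== PRECONDITION & SPEC =====
def Spec_truncate_chat_leakage_py (text : String) (out : String) : Prop := out = truncate_chat_leakage_py_alt text
instance (text : String) (out : String) : Decidable (Spec_truncate_chat_leakage_py text out) := by unfold Spec_truncate_chat_leakage_py; infer_instance

-- ===== CLAIM (what is proved, stated in full; the proofs are below) =====
def Claim_equal_truncate_chat_leakage_py : Prop := ∀ (text : String), Dom_truncate_chat_leakage_py text → Spec_truncate_chat_leakage_py text (truncate_chat_leakage_py text)

-- ===== LEMMAS AND PROOFS =====

lemma pvScan_none_iff (ms : List (List Char)) (h : ∀ m ∈ ms, m ≠ []) :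
    ∀ (s : List Char) (i : Nat),
      pvScan ms s i = none ↔ ∀ j, ∀ m ∈ ms, ¬ m <+: s.drop j := by
  intro s
  induction s with
  | nil =>
    intro i
    simp only [pvScan, List.drop_nil, true_iff]
    intro j m hm hp
    exact h m hm (List.prefix_nil.mp hp)
  | cons c rest ih =>
    intro i
    simp only [pvScan]
    by_cases hany : ms.any (fun m => m.isPrefixOf (c :: rest)) = true
    · simp only [hany, if_true]
      constructor
      · intro hcontra; exact absurd hcontra (by simp)
      · intro hall
        obtain ⟨m, hm, hp⟩ := List.any_eq_true.mp hany
        exact absurd ((List.isPrefixOf_iff_prefix).mp hp) (by simpa using hall 0 m hm)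
    · simp only [hany, Bool.false_eq_true, if_false]
      rw [ih (i + 1)]
      constructor
      · intro hall j m hm
        cases j with
        | zero =>
          simp only [List.drop_zero]
          intro hp
          exact hany (List.any_eq_true.mpr ⟨m, hm, (List.isPrefixOf_iff_prefix).mpr hp⟩)
        | succ k =>
          simpa using hall k m hm
      · intro hall j m hm
        simpa using hall (j + 1) m hm
  
lemma pvScan_some (ms : List (List Char)) :
    ∀ (s : List Char) (i j : Nat), pvScan ms s i = some j →
      i ≤ j ∧ (∃ m ∈ ms, m <+: s.drop (j - i)) ∧ ∀ l < j - i, ∀ m ∈ ms, ¬ m <+: s.drop l := by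
  intro s
  induction s with
  | nil => intro i j hcontra; simp [pvScan] at hcontra
  | cons c rest ih =>
    intro i j hsome
    simp only [pvScan] at hsome
    by_cases hany : ms.any (fun m => m.isPrefixOf (c :: rest)) = true
    · simp only [hany, if_true, Option.some.injEq] at hsome
      subst hsome
      obtain ⟨m, hm, hp⟩ := List.any_eq_true.mp hany
      refine ⟨le_refl _, ⟨m, hm, by simpa using (List.isPrefixOf_iff_prefix).mp hp⟩, by omega⟩
    · simp only [hany, Bool.false_eq_true, if_false] at hsome
      obtain ⟨hle, ⟨m, hm, hp⟩, hmin⟩ := ih (i + 1) j hsome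
      refine ⟨by omega, ⟨m, hm, ?_⟩, ?_⟩
      · have : (c :: rest).drop (j - i) = rest.drop (j - (i + 1)) := by
          have : j - i = (j - (i + 1)) + 1 := by omega
          simp [this]
        rw [this]; exact hp
      · intro l hl m' hm'
        cases l with
        | zero =>
          simp only [List.drop_zero]
          intro hp'
          exact hany (List.any_eq_true.mpr ⟨m', hm', (List.isPrefixOf_iff_prefix).mpr hp'⟩)
        | succ k =>
          have : (c :: rest).drop (k + 1) = rest.drop k := by simp
          rw [this]
          exact hmin k (by omega) m' hm'

lemma pvMarkers_ne_nil : ∀ m ∈ pvMarkers, m ≠ [] := by decide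

-- ===== VERDICT (by name: the statement is the Claim_ definition above) =====
theorem truncate_chat_leakage_py_spec : Claim_equal_truncate_chat_leakage_py := by
  intro text _
  unfold Spec_truncate_chat_leakage_py truncate_chat_leakage_py truncate_chat_leakage_py_alt
  set L := PySem.Chars.lower text.toList with hL
  cases hscan : pvScan pvMarkers L 0 with
  | none =>
    -- no marker occurs anywhere: every find is -1, filtered list is empty
    have hnoocc := (pvScan_none_iff pvMarkers pvMarkers_ne_nil L 0).mp hscan
    have hfilt : (pvMarkers.map (fun marker => PySem.Chars.find L marker)).filter
        (fun pos => decide (0 ≤ pos)) = [] := by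
      rw [List.filter_eq_nil_iff]
      intro p hp
      obtain ⟨m, hm, rfl⟩ := List.mem_map.mp hp
      have hnin : ¬ m <:+: L := by
        intro hinf
        have : PySem.Chars.isIn m L = true := (PySem.Chars.isIn_iff_infix _ _).mpr hinf
        obtain ⟨j, hj⟩ := (PySem.Chars.exists_prefix_drop_iff_isIn _ _).mpr this
        exact hnoocc j m hm hj
      have := (PySem.Chars.find_eq_neg_one_iff _ _).mpr hnin
      simp [this]
    have hmn : PySem.List.min? ([] : List Int) (fun x => x) = none :=
      (PySem.List.min?_eq_none_iff _ _).mpr rfl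
    simp only [hscan, hfilt, hmn]
  | some j =>
    obtain ⟨-, ⟨m0, hm0, hp0⟩, hmin⟩ := pvScan_some pvMarkers L 0 j hscan
    simp only [Nat.sub_zero] at hp0 hmin
    -- find L m0 = j
    have hinf0 : m0 <:+: L := by
      rw [← PySem.Chars.isIn_iff_infix, ← PySem.Chars.exists_prefix_drop_iff_isIn]
      exact ⟨j, hp0⟩
    have hfind0 : 0 ≤ PySem.Chars.find L m0 := (PySem.Chars.find_nonneg_iff _ _).mpr hinf0
    obtain ⟨hpf, hminf⟩ := PySem.Chars.find_spec (s := L) (sub := m0) hfind0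
    have htn : (PySem.Chars.find L m0).toNat = j := by
      have h1 : ¬ j < (PySem.Chars.find L m0).toNat := fun hlt => hminf j hlt hp0
      have h2 : ¬ (PySem.Chars.find L m0).toNat < j := fun hlt =>
        hmin _ hlt m0 hm0 hpf
      omega
    have hfj : PySem.Chars.find L m0 = (j : Int) := by omega
    -- j is in the filtered list
    set cps := (pvMarkers.map (fun marker => PySem.Chars.find L marker)).filter
        (fun pos => decide (0 ≤ pos)) with hcps
    have hjmem : (j : Int) ∈ cps := by
      rw [hcps, List.mem_filter]
      exact ⟨List.mem_map.mpr ⟨m0, hm0, hfj⟩, by simp⟩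
    -- every filtered position is ≥ j
    have hge : ∀ p ∈ cps, (j : Int) ≤ p := by
      intro p hp
      rw [hcps, List.mem_filter] at hp
      obtain ⟨hpm, hpn⟩ := hp
      obtain ⟨m, hm, rfl⟩ := List.mem_map.mp hpm
      have hpn' : 0 ≤ PySem.Chars.find L m := by simpa using hpn
      obtain ⟨hpf', -⟩ := PySem.Chars.find_spec (s := L) (sub := m) hpn'
      have : ¬ (PySem.Chars.find L m).toNat < j := fun hlt => hmin _ hlt m hm hpf'
      omega
    -- min? cps = some j
    cases hminq : PySem.List.min? cps (fun x => x) with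
    | none =>
      have : cps = [] := (PySem.List.min?_eq_none_iff _ _).mp hminq
      rw [this] at hjmem; simp at hjmem
    | some v =>
      have hv1 : v ∈ cps := PySem.List.min?_mem hminq
      have hv2 : ∀ y ∈ cps, v ≤ y := by
        intro y hy; exact PySem.List.min?_isMin hminq y hy
      have hvj : v = (j : Int) := le_antisymm (hv2 _ hjmem) (hge _ hv1)
      simp only [hscan]
      rw [← hcps, hminq, hvj]
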